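-- pv_equiv track=rewrite | github.com/igordmv/codewars | 4kyu/Twice_Linear/solution.py | dbl_linear
-- ===== SOURCE A (Python) =====
-- def dbl_linear(n):
--     u = [1]
--     dict = {}
--     for pos in range(0, n * 4):
--         y = 2 * u[pos] + 1
--         z = 3 * u[pos] + 1
--         if y not in dict.keys():
--             dict[y] = 1
--             u.append(y)
--         if z not in dict.keys():
--             dict[z] = 1
--             u.append(z)
--     u.sort()
--     return u[n]
-- ===== SOURCE B (Python) =====
-- _BUCKET = 256
--
--
-- def _insert_sorted(buckets, c):
--     """buckets: nonempty list of nonempty sorted lists, ascending across buckets.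
--     Insert c unless already present (two binary searches); return True iff inserted."""
--     # first bucket whose last element is >= c (the final bucket if there is none)
--     lo, hi = 0, len(buckets) - 1
--     while lo < hi:
--         mid = (lo + hi) // 2
--         if buckets[mid][-1] < c:
--             lo = mid + 1
--         else:
--             hi = mid
--     b = buckets[lo]
--     # position of c inside that bucket
--     i, j = 0, len(b)
--     while i < j:
--         mid = (i + j) // 2
--         if b[mid] < c:
--             i = mid + 1
--         else:
--             j = mid
--     if i < len(b) and b[i] == c:
--         return False
--     b.insert(i, c)
--     if len(b) > 2 * _BUCKET:
--         buckets[lo] = b[:_BUCKET]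
--         buckets.insert(lo + 1, b[_BUCKET:])
--     return True
--
--
-- def dbl_linear(n):
--     queue = [1]
--     buckets = [[1]]          # all generated values, kept sorted at all times
--     for pos in range(4 * n):
--         x = queue[pos]
--         for c in (2 * x + 1, 3 * x + 1):
--             if _insert_sorted(buckets, c):
--                 queue.append(c)
--     srt = [v for b in buckets for v in b]
--     return srt[n]
-- ===== Notes on version B (the rewrite author's own statement) =====
-- stated objective: alternative
-- what changed: B drops both of A's mechanisms - the hash seen-dict and the terminal u.sort() - and instead keeps all generated values in a two-level bucketed sorted list at all times, detecting duplicates by two binary searches (bucket, then position) and placing each new value by sorted insertion into its bucket (splitting full buckets), so the answer is read off the sorted values directly with no final sort.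
-- outside the precondition, e.g. on dbl_linear(-2): A raises IndexError, B raises IndexError
import Mathlib
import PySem

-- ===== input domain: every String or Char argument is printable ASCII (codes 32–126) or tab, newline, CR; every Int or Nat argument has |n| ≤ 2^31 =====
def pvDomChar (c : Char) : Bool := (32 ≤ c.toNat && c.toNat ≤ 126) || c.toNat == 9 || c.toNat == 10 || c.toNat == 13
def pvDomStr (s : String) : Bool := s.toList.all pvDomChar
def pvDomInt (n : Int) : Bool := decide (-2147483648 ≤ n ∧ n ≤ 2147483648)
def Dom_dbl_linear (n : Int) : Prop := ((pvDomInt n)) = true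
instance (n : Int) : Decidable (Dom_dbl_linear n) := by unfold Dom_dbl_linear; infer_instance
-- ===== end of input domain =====

-- B replaces A's two mechanisms (a hash seen-dict for the duplicate test, one terminal
-- u.sort()) by one always-sorted structure — a two-level bucketed sorted list: duplicates
-- are detected by two binary searches (bucket, then position) and new values are placed by
-- sorted insertion into their bucket, so the answer is read off the sorted values directly
-- with no final sort; objective: alternative (not claimed faster).  B keeps A's generation
-- budget of 4·n queue expansions, which is what fixes the generated set of values.
--
-- Container choices in the ports (each is exact for how this code uses them):
--  * a Python list that is only indexed at nonnegative positions and appended to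
--    (A's u, B's queue) → Array Int (xs[pos] for 0 ≤ pos is xs[pos.toNat]?,
--    none = IndexError — exact since every pos here comes from range(...) and is ≥ 0;
--    append = Array.push);
--  * B's buckets / the buckets themselves → List (List Int) / List Int, with
--    b[-1] via PySem.List.pyGet? and list.insert via PySem.List.insert;
--  * A's dict, used only for 'in dict.keys()' tests and insertions of Int keys (never
--    iterated) → Std.HashMap Int Int (same membership semantics);
--  * A's u.sort() on integers → List.mergeSort (· ≤ ·) (both are the ascending sort, and
--    a sorted list of Ints is determined by its multiset of elements).

-- ===== PORT A =====
-- loop body of A's 'for pos in range(0, n * 4)'; none = IndexError was raised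
def dblStepA (st : Option (Array Int × Std.HashMap Int Int)) (pos : Int) :
    Option (Array Int × Std.HashMap Int Int) :=
  match st with
  | none => none
  | some (u, d) =>
    match u[pos.toNat]? with   -- u[pos]; pos ≥ 0 always (it is a range(0, n*4) element)
    | none => none             -- u[pos] raises IndexError
    | some x =>
      let y := 2 * x + 1
      let z := 3 * x + 1
      -- 'if y not in dict.keys(): dict[y] = 1; u.append(y)' (state after the first if)
      let p1 := if d.contains y = false then (u.push y, d.insert y 1) else (u, d)
      -- the same for z, on the updated state
      let p2 := if p1.2.contains z = false then (p1.1.push z, p1.2.insert z 1) else p1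
      some p2

def dbl_linear (n : Int) : Int :=
  match (PySem.List.pyRange 0 (n * 4) 1).foldl dblStepA
      (some (#[(1 : Int)], (∅ : Std.HashMap Int Int))) with
  | none => 0                 -- A raised IndexError inside the loop (never observed under Pre_)
  | some (u, _) =>
      -- u.sort(); return u[n]
      (PySem.List.pyGet? (List.mergeSort u.toList (fun a b => a ≤ b)) n).getD 0

-- ===== PORT B =====
-- b[-1]; every bucket is nonempty on every use, so the .getD 0 default is never taken
def bLast (b : List Int) : Int := (PySem.List.pyGet? b (-1)).getD 0

-- the in-bucket 'while i < j' binary-search loop of _insert_sorted; b[mid] is always in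
-- range here (i ≤ mid < j ≤ len b on every call), so 'b.getD mid 0' is exactly Python's b[mid]
def bisectLoop (b : List Int) (c : Int) (i j : Nat) : Nat :=
  if _h : i < j then
    let mid := (i + j) / 2
    if b.getD mid 0 < c then bisectLoop b c (mid + 1) j
    else bisectLoop b c i mid
  else i
termination_by j - i
decreasing_by all_goals omega

-- the bucket-level 'while lo < hi' binary-search loop of _insert_sorted
def bisectBuckets (bks : List (List Int)) (c : Int) (lo hi : Nat) : Nat :=
  if _h : lo < hi then
    let mid := (lo + hi) / 2
    if bLast (bks.getD mid []) < c then bisectBuckets bks c (mid + 1) hi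
    else bisectBuckets bks c lo mid
  else lo
termination_by hi - lo
decreasing_by all_goals omega

-- _insert_sorted(buckets, c): returns (the updated buckets, the returned Bool);
-- _BUCKET = 256, and list.insert at an index 0 ≤ k ≤ len is PySem.List.insert
def insertSorted (bks : List (List Int)) (c : Int) : List (List Int) × Bool :=
  let lo := bisectBuckets bks c 0 (bks.length - 1)
  let b := bks.getD lo []
  let i := bisectLoop b c 0 b.length
  if i < b.length ∧ b.getD i 0 = c then (bks, false)
  else
    let b' := PySem.List.insert b (i : Int) c      -- b.insert(i, c)
    if 2 * 256 < b'.length then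
      -- buckets[lo] = b[:256]; buckets.insert(lo + 1, b[256:])
      (PySem.List.insert (bks.set lo (b'.take 256)) ((lo : Int) + 1) (b'.drop 256), true)
    else (bks.set lo b', true)

-- loop body of B's 'for pos in range(4 * n)'; none = IndexError was raised
def dblStepB (st : Option (Array Int × List (List Int))) (pos : Int) :
    Option (Array Int × List (List Int)) :=
  match st with
  | none => none
  | some (queue, bks) =>
    match queue[pos.toNat]? with  -- queue[pos]; pos ≥ 0 always (it is a range(4*n) element)
    | none => none                -- queue[pos] raises IndexError
    | some x =>
      -- 'for c in (2*x+1, 3*x+1): if _insert_sorted(buckets, c): queue.append(c)'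
      some ([2 * x + 1, 3 * x + 1].foldl
        (fun (p : Array Int × List (List Int)) c =>
          let r := insertSorted p.2 c
          (if r.2 = true then p.1.push c else p.1, r.1))
        (queue, bks))

def dbl_linear_alt (n : Int) : Int :=
  match (PySem.List.pyRange 0 (4 * n) 1).foldl dblStepB
      (some (#[(1 : Int)], [[(1 : Int)]])) with
  | none => 0                 -- B raised IndexError inside the loop (never observed under Pre_)
  | some (_, bks) =>
      -- srt = [v for b in buckets for v in b]; return srt[n]
      (PySem.List.pyGet? bks.flatten n).getD 0

-- ===== PRECONDITION & SPEC =====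
-- Pre_ excludes only n ≤ -2, where both Pythons raise IndexError on the final [n] indexing.
def Pre_dbl_linear (n : Int) : Prop := -1 ≤ n
instance (n : Int) : Decidable (Pre_dbl_linear n) := by unfold Pre_dbl_linear; infer_instance
def pvWitness_dbl_linear : Int := (3)
def Spec_dbl_linear (n : Int) (out : Int) : Prop := out = dbl_linear_alt n
instance (n : Int) (out : Int) : Decidable (Spec_dbl_linear n out) := by unfold Spec_dbl_linear; infer_instance

-- ===== CLAIM (what is proved, stated in full; the proofs are below) =====
def Claim_equal_dbl_linear : Prop := ∀ (n : Int), Dom_dbl_linear n → Pre_dbl_linear n → Spec_dbl_linear n (dbl_linear n)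

-- ===== LEMMAS AND PROOFS =====

-- Relation between A's loop state and B's loop state: both raised, or
-- A holds (u, d) and B holds (q, bks) with q and u holding the same values 1 :: L,
-- d's key set = L, and bks a bucketed sorted duplicate-free arrangement of 1 :: L
-- whose non-seed elements are ≥ 3.
def DblRel (a : Option (Array Int × Std.HashMap Int Int))
    (b : Option (Array Int × List (List Int))) : Prop :=
  (a = none ∧ b = none) ∨
  ∃ (L : List Int) (u : Array Int) (d : Std.HashMap Int Int) (q : Array Int)
    (bks : List (List Int)),
    a = some (u, d) ∧ b = some (q, bks) ∧
    u.toList = 1 :: L ∧ q.toList = 1 :: L ∧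
    (∀ v : Int, d.contains v = decide (v ∈ L)) ∧
    bks ≠ [] ∧ (∀ b' ∈ bks, b' ≠ []) ∧
    bks.flatten.Perm (1 :: L) ∧ bks.flatten.Pairwise (· ≤ ·) ∧
    (1 :: L).Nodup ∧ (∀ c ∈ L, 3 ≤ c)

-- on a list sorted below N, getD is monotone in the index below N
lemma sorted_getD_mono (srt : List Int) (hs : srt.Pairwise (· ≤ ·))
    (i j : Nat) (hij : i ≤ j) (hj : j < srt.length) :
    srt.getD i 0 ≤ srt.getD j 0 := by
  rcases Nat.lt_or_ge i j with hlt | hge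
  · rw [List.getD_eq_getElem srt 0 (by omega), List.getD_eq_getElem srt 0 hj]
    exact List.pairwise_iff_getElem.mp hs i j (by omega) hj hlt
  · have hij' : i = j := by omega
    rw [hij']

-- shared specification of both binary-search loops: xs is only assumed monotone below N,
-- and only indices below N are constrained (for the bucket loop N is len - 1: the final
-- bucket is the fallback and carries no bound)
lemma bisectLoop_spec (xs : List Int) (c : Int) (N : Nat)
    (hmono : ∀ i j : Nat, i ≤ j → j < N → xs.getD i 0 ≤ xs.getD j 0) (lo hi : Nat)
    (hlo : ∀ j : Nat, j < lo → xs.getD j 0 < c)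
    (hhi : ∀ j : Nat, hi ≤ j → j < N → c ≤ xs.getD j 0)
    (hle : lo ≤ hi) (hhil : hi ≤ N) :
    (∀ j : Nat, j < bisectLoop xs c lo hi → xs.getD j 0 < c) ∧
    (∀ j : Nat, bisectLoop xs c lo hi ≤ j → j < N → c ≤ xs.getD j 0) ∧
    bisectLoop xs c lo hi ≤ hi := by
  fun_induction bisectLoop xs c lo hi with
  | case1 lo hi h mid hlt ih =>
      have hres := ih ?_ hhi (by omega) hhil
      · exact ⟨hres.1, hres.2.1, by omega⟩
      · intro j hj
        exact lt_of_le_of_lt (hmono j mid (by omega) (by omega)) hlt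
  | case2 lo hi h mid hge ih =>
      have hres := ih hlo ?_ (by omega) (by omega)
      · exact ⟨hres.1, hres.2.1, by omega⟩
      · intro j hj hjl
        exact le_trans (not_lt.mp hge) (hmono mid j hj (by omega))
  | case3 lo hi h =>
      exact ⟨hlo, fun j hj hjl => hhi j (by omega) hjl, by omega⟩

-- the bucket-level loop is the shared loop on the list of bucket last-elements
lemma bisectBuckets_eq (bks : List (List Int)) (c : Int) (lo hi : Nat) :
    bisectBuckets bks c lo hi = bisectLoop (bks.map bLast) c lo hi := by
  have hmap : ∀ m : Nat, (bks.map bLast).getD m 0 = bLast (bks.getD m []) := by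
    intro m
    by_cases h : m < bks.length
    · rw [List.getD_eq_getElem _ 0 (by simpa using h), List.getD_eq_getElem _ [] h,
        List.getElem_map]
    · rw [List.getD_eq_default _ 0 (by simpa using h), List.getD_eq_default _ [] (by omega)]
      rfl
  fun_induction bisectBuckets bks c lo hi with
  | case1 lo hi h mid hlt ih =>
      rw [ih]
      conv_rhs => rw [bisectLoop]
      rw [dif_pos h]
      dsimp only
      rw [if_pos (by rw [hmap]; exact hlt)]
  | case2 lo hi h mid hge ih =>
      rw [ih]
      conv_rhs => rw [bisectLoop]
      rw [dif_pos h]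
      dsimp only
      rw [if_neg (by rw [hmap]; exact hge)]
  | case3 lo hi h =>
      rw [bisectLoop, dif_neg h]

-- PySem.List.insert at a nonnegative in-range index is take/cons/drop
lemma pyInsert_natCast {α : Type} (xs : List α) (k : Nat) (h : k ≤ xs.length) (v : α) :
    PySem.List.insert xs (k : Int) v = xs.take k ++ v :: xs.drop k := by
  simp only [PySem.List.insert, PySem.List.sliceIndices]
  have h1 : ((if ((k : Int)) < 0 then max (↑k + ↑xs.length) 0
      else min (↑k) (↑xs.length) : Int)).toNat = k := by split_ifs <;> omega
  norm_num
  rw [h1]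

-- b[-1] of a nonempty bucket, as a getD
lemma bLast_eq (b : List Int) (h : b ≠ []) : bLast b = b.getD (b.length - 1) 0 := by
  have hlen : 0 < b.length := List.length_pos_iff.mpr h
  rw [bLast, PySem.List.pyGet?_neg_one, List.getLast?_eq_some_getLast h, Option.getD_some,
    List.getD_eq_getElem b 0 (by omega), List.getLast_eq_getElem]

lemma bLast_mem (b : List Int) (h : b ≠ []) : bLast b ∈ b := by
  have hlen : 0 < b.length := List.length_pos_iff.mpr h
  rw [bLast_eq b h, List.getD_eq_getElem b 0 (by omega)]
  exact List.getElem_mem (by omega)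

lemma bLast_max (b : List Int) (h : b ≠ []) (hs : b.Pairwise (· ≤ ·)) :
    ∀ a ∈ b, a ≤ bLast b := by
  intro a ha
  have hlen : 0 < b.length := List.length_pos_iff.mpr h
  obtain ⟨j, hj, he⟩ := List.mem_iff_getElem.mp ha
  rw [bLast_eq b h, ← he, ← List.getD_eq_getElem b 0 hj]
  exact sorted_getD_mono b hs j (b.length - 1) (by omega) (by omega)

-- cross-bucket ordering from a pairwise flattening (works for ≤ and for ≠)
lemma flatten_cross {R : Int → Int → Prop} (bks : List (List Int))
    (h : bks.flatten.Pairwise R) (m1 m2 : Nat) (h12 : m1 < m2) (hm2 : m2 < bks.length) :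
    ∀ x ∈ bks[m1], ∀ y ∈ bks[m2], R x y :=
  fun x hx y hy =>
    List.pairwise_iff_getElem.mp (List.pairwise_flatten.mp h).2 m1 m2 (by omega) hm2 h12 x hx y hy

-- everything _insert_sorted guarantees, in one statement
lemma insertSorted_spec (bks : List (List Int)) (c : Int)
    (hne : bks ≠ []) (hbne : ∀ b ∈ bks, b ≠ [])
    (hs : bks.flatten.Pairwise (· ≤ ·)) (hnd : bks.flatten.Nodup) :
    (c ∈ bks.flatten → insertSorted bks c = (bks, false)) ∧
    (c ∉ bks.flatten → ∃ bks', insertSorted bks c = (bks', true) ∧ bks' ≠ [] ∧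
      (∀ b ∈ bks', b ≠ []) ∧ bks'.flatten.Perm (c :: bks.flatten) ∧
      bks'.flatten.Pairwise (· ≤ ·)) := by
  have hlen0 : 0 < bks.length := List.length_pos_iff.mpr hne
  have hbsorted : ∀ b ∈ bks, b.Pairwise (· ≤ ·) :=
    fun b hb => hs.sublist (List.sublist_flatten_of_mem hb)
  have hmap : ∀ m : Nat, (bks.map bLast).getD m 0 = bLast (bks.getD m []) := by
    intro m
    by_cases h : m < bks.length
    · rw [List.getD_eq_getElem _ 0 (by simpa using h), List.getD_eq_getElem _ [] h,
        List.getElem_map]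
    · rw [List.getD_eq_default _ 0 (by simpa using h), List.getD_eq_default _ [] (by omega)]
      rfl
  -- the list of bucket last-elements is monotone
  have hmono : ∀ i j : Nat, i ≤ j → j < bks.length - 1 →
      (bks.map bLast).getD i 0 ≤ (bks.map bLast).getD j 0 := by
    intro i j hij hj
    rcases Nat.lt_or_ge i j with hlt | hge
    · rw [hmap i, hmap j, List.getD_eq_getElem bks [] (by omega),
        List.getD_eq_getElem bks [] (by omega)]
      exact flatten_cross bks hs i j hlt (by omega) _
        (bLast_mem _ (hbne _ (List.getElem_mem _))) _
        (bLast_mem _ (hbne _ (List.getElem_mem _)))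
    · have : i = j := by omega
      rw [this]
  obtain ⟨h1B, h2B, hloB⟩ := bisectLoop_spec (bks.map bLast) c (bks.length - 1) hmono
    0 (bks.length - 1) (by omega) (fun j hj hjl => by omega) (by omega) le_rfl
  rw [← bisectBuckets_eq] at h1B h2B hloB
  set lo := bisectBuckets bks c 0 (bks.length - 1) with hlodef
  have hlo_lt : lo < bks.length := by omega
  set b := bks.getD lo [] with hbdef
  have hb_elem : b = bks[lo] := List.getD_eq_getElem bks [] hlo_lt
  have hbmem : b ∈ bks := hb_elem ▸ List.getElem_mem hlo_lt
  have hbne' : b ≠ [] := hbne b hbmem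
  have hbs : b.Pairwise (· ≤ ·) := hbsorted b hbmem
  obtain ⟨h1, h2, hile⟩ := bisectLoop_spec b c b.length
    (fun i j hij hj => sorted_getD_mono b hbs i j hij hj)
    0 b.length (by omega) (fun j hj hjl => by omega) (by omega) le_rfl
  set i := bisectLoop b c 0 b.length with hidef
  -- the found in-bucket position characterises membership in the bucket
  have hcond_b : (i < b.length ∧ b.getD i 0 = c) ↔ c ∈ b := by
    constructor
    · rintro ⟨hk, he⟩
      rw [List.getD_eq_getElem b 0 hk] at he
      exact he ▸ List.getElem_mem hk
    · intro hc
      obtain ⟨j, hj, he⟩ := List.mem_iff_getElem.mp hc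
      rcases Nat.lt_or_ge j i with hji | hji
      · have hjc := h1 j hji
        rw [List.getD_eq_getElem b 0 hj, he] at hjc
        omega
      · have hk : i < b.length := by omega
        have hck := h2 _ le_rfl hk
        have hkj := sorted_getD_mono b hbs _ j hji hj
        refine ⟨hk, ?_⟩
        rw [List.getD_eq_getElem b 0 hj, he] at hkj
        rw [List.getD_eq_getElem b 0 hk] at hck ⊢
        rw [List.getD_eq_getElem b 0 hk] at hkj
        omega
  -- decompose the bucket list around bucket lo
  have hbks : bks = bks.take lo ++ b :: bks.drop (lo + 1) := by
    conv_lhs => rw [← List.take_append_drop lo bks, List.drop_eq_getElem_cons hlo_lt]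
    rw [hb_elem]
  have hflat : bks.flatten = (bks.take lo).flatten ++ b ++ (bks.drop (lo + 1)).flatten := by
    conv_lhs => rw [hbks]
    simp [List.flatten_append]
  -- every value in an earlier bucket is < c
  have hPc : ∀ a ∈ (bks.take lo).flatten, a < c := by
    intro a ha
    obtain ⟨p, hp, hap⟩ := List.mem_flatten.mp ha
    obtain ⟨m, hm, hpe⟩ := List.mem_take_iff_getElem.mp hp
    have hmlo : m < lo := by omega
    have hmlen : m < bks.length := by omega
    have hlast := h1B m hmlo
    rw [hmap m, List.getD_eq_getElem bks [] hmlen] at hlast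
    have hamax : a ≤ bLast bks[m] := by
      refine bLast_max bks[m] (hbne _ (List.getElem_mem hmlen)) (hbsorted _ (List.getElem_mem hmlen)) a ?_
      rw [hpe]; exact hap
    omega
  -- every value in a later bucket is ≥ c, and c itself is not there
  have hSfacts : ∀ x ∈ (bks.drop (lo + 1)).flatten, c ≤ x ∧ x ≠ c := by
    intro x hx
    obtain ⟨p, hp, hxp⟩ := List.mem_flatten.mp hx
    obtain ⟨t, ht, hpe⟩ := List.mem_iff_getElem.mp hp
    rw [List.getElem_drop] at hpe
    have hm : lo + 1 + t < bks.length := by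
      have hld : (bks.drop (lo + 1)).length = bks.length - (lo + 1) := List.length_drop
      omega
    have hmid : lo + t < bks.length - 1 := by omega
    have hcle : c ≤ bLast bks[lo + t] := by
      have := h2B (lo + t) (by omega) hmid
      rw [hmap, List.getD_eq_getElem bks [] (by omega)] at this
      exact this
    have hlmem : bLast bks[lo + t] ∈ bks[lo + t] :=
      bLast_mem _ (hbne _ (List.getElem_mem (by omega)))
    have hxmem : x ∈ bks[lo + 1 + t] := hpe ▸ hxp
    have hcross : bLast bks[lo + t] ≤ x :=
      flatten_cross bks hs (lo + t) (lo + 1 + t) (by omega) hm _ hlmem _ hxmem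
    refine ⟨by omega, ?_⟩
    intro hxc
    have hEq : bLast bks[lo + t] = c := by omega
    exact (flatten_cross (R := (· ≠ ·)) bks hnd (lo + t) (lo + 1 + t) (by omega) hm
      _ hlmem _ hxmem) (by rw [hEq, hxc])
  -- membership in all values ↔ the binary searches found c
  have hmem_iff : c ∈ bks.flatten ↔ (i < b.length ∧ b.getD i 0 = c) := by
    rw [hflat]
    constructor
    · intro hc
      rcases List.mem_append.mp hc with hc1 | hc2
      · rcases List.mem_append.mp hc1 with hc3 | hc4
        · exact absurd (hPc c hc3) (lt_irrefl c)
        · exact hcond_b.mpr hc4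
      · exact absurd rfl (hSfacts c hc2).2
    · intro hcond
      exact List.mem_append.mpr (Or.inl (List.mem_append.mpr (Or.inr (hcond_b.mp hcond))))
  constructor
  · -- present: nothing changes
    intro hmem
    rw [insertSorted, if_pos (by rw [← hbdef, ← hidef]; exact hmem_iff.mp hmem)]
  · -- absent: c is inserted into bucket lo (and the bucket possibly split)
    intro hmem
    have hb' : PySem.List.insert b (i : Int) c = b.take i ++ c :: b.drop i :=
      pyInsert_natCast b i hile c
    -- both branches produce a bucket list whose flattening is this list
    set flat' := (bks.take lo).flatten ++ (b.take i ++ c :: b.drop i)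
      ++ (bks.drop (lo + 1)).flatten with hflat'def
    have hbtake : ∀ a ∈ b.take i, a < c := by
      intro a ha
      obtain ⟨j, hj, he⟩ := List.mem_take_iff_getElem.mp ha
      have hlt := h1 j (by omega)
      rw [List.getD_eq_getElem b 0 (by omega), he] at hlt
      exact hlt
    have hbdrop : ∀ x ∈ b.drop i, c ≤ x := by
      intro x hx
      obtain ⟨j, hj, he⟩ := List.mem_iff_getElem.mp hx
      rw [List.getElem_drop] at he
      have hjm : j < b.length - i := by simpa [List.length_drop] using hj
      have hle2 := h2 (i + j) (by omega) (by omega)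
      rw [List.getD_eq_getElem b 0 (by omega), he] at hle2
      exact hle2
    have hperm' : flat'.Perm (c :: bks.flatten) := by
      rw [hflat'def, hflat]
      have e1 : (bks.take lo).flatten ++ (b.take i ++ c :: b.drop i)
          ++ (bks.drop (lo + 1)).flatten
          = ((bks.take lo).flatten ++ b.take i)
            ++ c :: (b.drop i ++ (bks.drop (lo + 1)).flatten) := by simp
      have e2 : ((bks.take lo).flatten ++ b.take i)
          ++ (b.drop i ++ (bks.drop (lo + 1)).flatten)
          = (bks.take lo).flatten ++ b ++ (bks.drop (lo + 1)).flatten := by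
        simp only [List.append_assoc]
        congr 1
        rw [← List.append_assoc, List.take_append_drop]
      rw [e1, ← e2]
      exact List.perm_middle
    have hpw' : flat'.Pairwise (· ≤ ·) := by
      have hsplit : bks.flatten = ((bks.take lo).flatten ++ b.take i)
          ++ (b.drop i ++ (bks.drop (lo + 1)).flatten) := by
        rw [hflat]
        simp only [List.append_assoc]
        congr 1
        rw [← List.append_assoc, List.take_append_drop]
      rw [hsplit] at hs
      obtain ⟨hl, hr, hcross⟩ := List.pairwise_append.mp hs
      have hgoal : (((bks.take lo).flatten ++ b.take i)
          ++ c :: (b.drop i ++ (bks.drop (lo + 1)).flatten)).Pairwise (· ≤ ·) := by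
        rw [List.pairwise_append]
        refine ⟨hl, List.pairwise_cons.mpr ⟨?_, hr⟩, ?_⟩
        · intro x hx
          rcases List.mem_append.mp hx with hx1 | hx2
          · exact hbdrop x hx1
          · exact (hSfacts x hx2).1
        · intro a ha x hx
          rcases List.mem_cons.mp hx with hx1 | hx2
          · have : a < c := by
              rcases List.mem_append.mp ha with ha1 | ha2
              · exact hPc a ha1
              · exact hbtake a ha2
            omega
          · exact hcross a ha x hx2
      rw [hflat'def]
      simpa [List.append_assoc] using hgoal
    have hne_parts : b.take i ++ c :: b.drop i ≠ [] := by simp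
    -- the two branches of the split test
    rw [insertSorted]
    rw [if_neg (by rw [← hbdef, ← hidef]; exact fun hcond => hmem (hmem_iff.mpr hcond))]
    rw [← hlodef, ← hbdef, ← hidef, hb']
    by_cases hsplit : 2 * 256 < (b.take i ++ c :: b.drop i).length
    · rw [if_pos hsplit]
      set b' := b.take i ++ c :: b.drop i with hb'def
      have hset : bks.set lo (b'.take 256) = bks.take lo ++ b'.take 256 :: bks.drop (lo + 1) := by
        rw [List.set_eq_take_append_cons_drop, if_pos hlo_lt]
      have hlen_take : (bks.take lo ++ [b'.take 256]).length = lo + 1 := by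
        simp
        omega
      have hins : PySem.List.insert (bks.take lo ++ b'.take 256 :: bks.drop (lo + 1))
          ((lo : Int) + 1) (b'.drop 256)
          = bks.take lo ++ b'.take 256 :: b'.drop 256 :: bks.drop (lo + 1) := by
        have hcast : ((lo : Int) + 1) = ((lo + 1 : Nat) : Int) := by push_cast; ring
        rw [hcast, pyInsert_natCast _ (lo + 1)
          (by simp; omega) (b'.drop 256)]
        rw [show bks.take lo ++ b'.take 256 :: bks.drop (lo + 1)
            = (bks.take lo ++ [b'.take 256]) ++ bks.drop (lo + 1) by simp]
        rw [List.take_left' hlen_take, List.drop_left' hlen_take]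
        simp
      have hsplitflat : (bks.take lo ++ b'.take 256 :: b'.drop 256 :: bks.drop (lo + 1)).flatten
          = flat' := by
        rw [hflat'def]
        simp only [List.flatten_append, List.flatten_cons]
        rw [show b'.take 256 ++ (b'.drop 256 ++ (bks.drop (lo + 1)).flatten)
            = b' ++ (bks.drop (lo + 1)).flatten from by
          rw [← List.append_assoc, List.take_append_drop]]
        simp only [List.append_assoc]
      refine ⟨_, by rw [hset, hins], by simp, ?_, ?_, ?_⟩
      · intro p hp
        rcases List.mem_append.mp hp with hp1 | hp2
        · exact hbne p (List.mem_of_mem_take hp1)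
        · rcases List.mem_cons.mp hp2 with hp3 | hp4
          · rw [hp3]
            have : (b'.take 256).length = 256 := by simp; omega
            exact List.ne_nil_of_length_pos (by omega)
          · rcases List.mem_cons.mp hp4 with hp5 | hp6
            · rw [hp5]
              have : (b'.drop 256).length = b'.length - 256 := by simp
              exact List.ne_nil_of_length_pos (by omega)
            · exact hbne p (List.mem_of_mem_drop hp6)
      · rw [hsplitflat]
        exact hperm'
      · rw [hsplitflat]
        exact hpw'
    · rw [if_neg hsplit]
      have hset : bks.set lo (b.take i ++ c :: b.drop i)
          = bks.take lo ++ (b.take i ++ c :: b.drop i) :: bks.drop (lo + 1) := by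
        rw [List.set_eq_take_append_cons_drop, if_pos hlo_lt]
      have hnsflat : (bks.set lo (b.take i ++ c :: b.drop i)).flatten = flat' := by
        rw [hset, hflat'def]
        simp only [List.flatten_append, List.flatten_cons, List.append_assoc, List.cons_append]
      refine ⟨_, rfl, by rw [hset]; simp, ?_, ?_, ?_⟩
      · intro p hp
        rw [hset] at hp
        rcases List.mem_append.mp hp with hp1 | hp2
        · exact hbne p (List.mem_of_mem_take hp1)
        · rcases List.mem_cons.mp hp2 with hp3 | hp4
          · rw [hp3]; exact hne_parts
          · exact hbne p (List.mem_of_mem_drop hp4)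
      · rw [hnsflat]
        exact hperm'
      · rw [hnsflat]
        exact hpw'

-- one child value c (≥ 3) processed on both sides preserves the relation
lemma child_step (L : List Int) (u : Array Int) (d : Std.HashMap Int Int)
    (q : Array Int) (bks : List (List Int)) (c : Int)
    (hu : u.toList = 1 :: L) (hq : q.toList = 1 :: L)
    (hd : ∀ v : Int, d.contains v = decide (v ∈ L))
    (hne : bks ≠ []) (hbne : ∀ b ∈ bks, b ≠ [])
    (hp : bks.flatten.Perm (1 :: L)) (hs : bks.flatten.Pairwise (· ≤ ·))
    (hn : (1 :: L).Nodup) (hg : ∀ x ∈ L, 3 ≤ x) (hc : 3 ≤ c) :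
    ∃ (L' : List Int) (u' : Array Int) (d' : Std.HashMap Int Int) (q' : Array Int)
      (bks' : List (List Int)),
      (if d.contains c = false then (u.push c, d.insert c 1) else (u, d)) = (u', d') ∧
      ((fun (p : Array Int × List (List Int)) c =>
          let r := insertSorted p.2 c
          (if r.2 = true then p.1.push c else p.1, r.1)) (q, bks) c) = (q', bks') ∧
      u'.toList = 1 :: L' ∧ q'.toList = 1 :: L' ∧
      (∀ v : Int, d'.contains v = decide (v ∈ L')) ∧
      bks' ≠ [] ∧ (∀ b ∈ bks', b ≠ []) ∧
      bks'.flatten.Perm (1 :: L') ∧ bks'.flatten.Pairwise (· ≤ ·) ∧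
      (1 :: L').Nodup ∧ (∀ x ∈ L', 3 ≤ x) := by
  have hnd : bks.flatten.Nodup := (hp.nodup_iff).mpr hn
  have hspec := insertSorted_spec bks c hne hbne hs hnd
  have hc1 : c ≠ 1 := by omega
  have hmem_flat : c ∈ bks.flatten ↔ c ∈ L := by
    rw [hp.mem_iff, List.mem_cons]
    simp [hc1]
  by_cases hin : c ∈ L
  · have hct : d.contains c = true := by rw [hd]; simpa
    have hins := hspec.1 (hmem_flat.mpr hin)
    exact ⟨L, u, d, q, bks, by rw [hct]; simp, by simp [hins], hu, hq, hd,
      hne, hbne, hp, hs, hn, hg⟩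
  · have hcf : d.contains c = false := by rw [hd]; simpa
    obtain ⟨bks', hbks', hne', hbne', hperm', hpw'⟩ :=
      hspec.2 (fun hm => hin (hmem_flat.mp hm))
    have h1L : (1 : Int) ∉ L := (List.nodup_cons.mp hn).1
    refine ⟨L ++ [c], u.push c, d.insert c 1, q.push c, bks',
      by rw [hcf]; simp, by simp [hbks'], by simp [hu], by simp [hq], ?_,
      hne', hbne', ?_, hpw', ?_, ?_⟩
    · intro v
      rw [Std.HashMap.contains_insert, hd]
      by_cases hv : v = c
      · simp [hv]
      · simp [List.mem_append, hv, Ne.symm hv]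
    · refine hperm'.trans ?_
      refine (hp.cons c).trans ?_
      rw [show (1 : Int) :: (L ++ [c]) = (1 :: L) ++ [c] from rfl]
      exact (List.perm_append_singleton c (1 :: L)).symm
    · rw [List.nodup_cons]
      refine ⟨by simp [h1L, Ne.symm hc1], ?_⟩
      rw [List.nodup_append]
      refine ⟨(List.nodup_cons.mp hn).2, List.nodup_singleton c, ?_⟩
      intro a haL b hb h
      have hEq : b = c := by simpa using hb
      rw [h, hEq] at haL
      exact hin haL
    · intro x hx
      rcases List.mem_append.mp hx with hx1 | hx2
      · exact hg x hx1
      · rw [List.mem_singleton.mp hx2]; exact hc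

-- one loop iteration preserves the relation (any index p : both sides read the same values)
lemma dblRel_step (a : Option (Array Int × Std.HashMap Int Int))
    (b : Option (Array Int × List (List Int))) (h : DblRel a b) (p : Int) :
    DblRel (dblStepA a p) (dblStepB b p) := by
  rcases h with ⟨ha, hb⟩ | ⟨L, u, d, q, bks, ha, hb, hu, hq, hd, hne, hbne, hp, hs, hn, hg⟩
  · subst ha; subst hb
    exact Or.inl ⟨rfl, rfl⟩
  · subst ha; subst hb
    unfold dblStepA dblStepB
    have hqu : q[p.toNat]? = u[p.toNat]? := by
      rw [← Array.getElem?_toList, ← Array.getElem?_toList, hu, hq]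
    cases heq : u[p.toNat]? with
    | none => exact Or.inl ⟨by simp only [heq], by simp only [hqu, heq]⟩
    | some x =>
      have hx1 : 1 ≤ x := by
        have hxmem : x ∈ u.toList := by
          have := Array.getElem?_toList (xs := u) (i := p.toNat)
          rw [heq] at this
          exact List.mem_of_getElem? this
        rw [hu] at hxmem
        rcases List.mem_cons.mp hxmem with h1 | h2
        · omega
        · have := hg x h2; omega
      obtain ⟨L1, u1, d1, q1, bks1, hA1, hB1, hu1, hq1, hd1, hne1, hbne1, hp1, hs1, hn1, hg1⟩ :=
        child_step L u d q bks (2 * x + 1) hu hq hd hne hbne hp hs hn hg (by omega)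
      obtain ⟨L2, u2, d2, q2, bks2, hA2, hB2, hu2, hq2, hd2, hne2, hbne2, hp2, hs2, hn2, hg2⟩ :=
        child_step L1 u1 d1 q1 bks1 (3 * x + 1) hu1 hq1 hd1 hne1 hbne1 hp1 hs1 hn1 hg1 (by omega)
      refine Or.inr ⟨L2, u2, d2, q2, bks2, ?_, ?_, hu2, hq2, hd2, hne2, hbne2, hp2, hs2, hn2, hg2⟩
      · simp only [heq, hA1, hA2]
      · simp only [hqu, heq, List.foldl_cons, List.foldl_nil, hB1, hB2]

lemma dblRel_foldl (ps : List Int) (a : Option (Array Int × Std.HashMap Int Int))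
    (b : Option (Array Int × List (List Int))) (h : DblRel a b) :
    DblRel (ps.foldl dblStepA a) (ps.foldl dblStepB b) := by
  induction ps generalizing a b with
  | nil => exact h
  | cons p ps ih => exact ih _ _ (dblRel_step a b h p)

-- a sorted permutation names the result of mergeSort
lemma mergeSort_eq_sorted (l ys : List Int) (hperm : ys.Perm l)
    (hpw : ys.Pairwise (· ≤ ·)) : List.mergeSort l (fun a b => a ≤ b) = ys := by
  apply List.Perm.eq_of_pairwise (le := fun a b : Int => a ≤ b)
  · intro a b _ _ h1 h2; omega
  · exact List.Pairwise.imp (by simp)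
      (List.pairwise_mergeSort (by intro a b c; simp; omega) (by intro a b; simp; omega) l)
  · exact hpw
  · exact (List.mergeSort_perm l _).trans hperm.symm

-- ===== VERDICT (by name: the statement is the Claim_ definition above) =====
theorem dbl_linear_spec : Claim_equal_dbl_linear := by
  unfold Claim_equal_dbl_linear
  intro n _ _
  unfold Spec_dbl_linear dbl_linear dbl_linear_alt
  rw [show (4 : Int) * n = n * 4 by ring]
  have h0 : DblRel (some (#[(1 : Int)], (∅ : Std.HashMap Int Int)))
      (some (#[(1 : Int)], [[(1 : Int)]])) := by
    refine Or.inr ⟨[], #[(1 : Int)], ∅, #[(1 : Int)], [[(1 : Int)]],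
      rfl, rfl, rfl, rfl, ?_, ?_, ?_, ?_, ?_, ?_, ?_⟩ <;> simp
  rcases dblRel_foldl (PySem.List.pyRange 0 (n * 4) 1) _ _ h0 with
    ⟨ha, hb⟩ | ⟨L, u, d, q, bks, ha, hb, hu, hq, hd, hne, hbne, hp, hs, hn, hg⟩
  · rw [ha, hb]
  · rw [ha, hb]
    dsimp only
    rw [hu, mergeSort_eq_sorted (1 :: L) bks.flatten hp hs]
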